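-- pv_equiv track=rewrite | github.com/jimhorng/algorithm | min_cpu_run_task/prob3_sol3.py | prob3
-- ===== SOURCE A (Python) =====
-- import heapq
--
-- def _feasible_with_k(tasks: list[tuple[int, int]], task_length: int, num_cpus: int) -> bool:
--     """
--     Check whether all tasks can be scheduled on `num_cpus` CPUs.
--
--     tasks: list of (release_time, latest_start), sorted by release_time.
--     """
--     n = len(tasks)
--
--     machines = [0] * num_cpus
--     heapq.heapify(machines)
--
--     available: list[tuple[int, int]] = []  # (latest_start, release_time)
--     idx = 0
--
--     while True:
--         if idx >= n and not available:
--             return True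
--
--         current_time = heapq.heappop(machines)
--
--         if not available and idx < n and current_time < tasks[idx][0]:
--             current_time = tasks[idx][0]
--
--         while idx < n and tasks[idx][0] <= current_time:
--             release_time, latest_start = tasks[idx]
--             heapq.heappush(available, (latest_start, release_time))
--             idx += 1
--
--         if not available:
--             heapq.heappush(machines, current_time)
--             continue
--
--         latest_start, _release = heapq.heappop(available)
--         if current_time > latest_start:
--             return False
--
--         heapq.heappush(machines, current_time + task_length)
--
-- def prob3(start_times: list[int], task_length: int, deadlines: list[int]) -> int:
--     """
--     Return the minimum number of CPUs required so that each task finishes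
--     by its own deadline, or -1 if impossible.
--     """
--     n = len(start_times)
--     if n != len(deadlines):
--         raise ValueError("start_times and deadlines must have the same length")
--     if n == 0:
--         return 0
--
--     if task_length < 0:
--         raise ValueError("task_length must be non-negative")
--
--     if task_length == 0:
--         # Zero-length tasks only need release <= deadline
--         return -1 if any(s > d for s, d in zip(start_times, deadlines)) else 1
--
--     tasks: list[tuple[int, int]] = []
--     for start_time, deadline in zip(start_times, deadlines):
--         latest_start = deadline - task_length
--         if latest_start < start_time:
--             return -1
--         tasks.append((start_time, latest_start))
--
--     tasks.sort(key=lambda x: x[0])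
--
--     left, right = 1, n
--     while left < right:
--         mid = (left + right) // 2
--         if _feasible_with_k(tasks, task_length, mid):
--             right = mid
--         else:
--             left = mid + 1
--
--     return left
-- ===== SOURCE B (Python) =====
-- def prob3(start_times, task_length, deadlines):
--     """
--     Minimum number of CPUs so every task finishes by its deadline, or -1.
--     Same greedy feasibility rule as the reference, but run on plain sorted
--     lists instead of heaps, with a recursive binary search.
--     """
--     if len(start_times) != len(deadlines):
--         raise ValueError("start_times and deadlines must have the same length")
--     if not start_times:
--         return 0
--     if task_length < 0:
--         raise ValueError("task_length must be non-negative")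
--     if task_length == 0:
--         return 1 if all(s <= d for s, d in zip(start_times, deadlines)) else -1
--
--     latest = [d - task_length for d in deadlines]
--     if any(l < s for s, l in zip(start_times, latest)):
--         return -1
--     tasks = sorted(zip(start_times, latest), key=lambda t: t[0])
--
--     def can_schedule(k):
--         free = [0] * k       # machine next-free times, ascending
--         waiting = []         # latest-start values of released tasks, ascending
--         todo = tasks         # unreleased tasks, ascending by release
--         while todo or waiting:
--             t = free[0]
--             if not waiting and t < todo[0][0]:
--                 t = todo[0][0]
--             waiting = sorted(waiting + [l for s, l in todo if s <= t])
--             todo = [task for task in todo if task[0] > t]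
--             if t > waiting[0]:
--                 return False
--             waiting = waiting[1:]
--             free = sorted([t + task_length] + free[1:])
--         return True
--
--     def search(lo, hi):
--         if lo >= hi:
--             return lo
--         mid = (lo + hi) // 2
--         return search(lo, mid) if can_schedule(mid) else search(mid + 1, hi)
--
--     return search(1, len(tasks))
-- ===== Notes on version B (the rewrite author's own statement) =====
-- stated objective: alternative
-- what changed: B replaces A's two heapq priority queues in the feasibility simulation by plain sorted lists (pop = head, re-sort to push) with filter comprehensions instead of an index-and-inner-while release loop, drops A's unreachable 'continue' branch, and turns the iterative binary search into a recursive one.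
-- outside the precondition, e.g. on prob3([1], -1, [5]): A raises ValueError, B raises ValueError; on prob3([1, 2], 0, [5]): A raises ValueError, B raises ValueError
import Mathlib
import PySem

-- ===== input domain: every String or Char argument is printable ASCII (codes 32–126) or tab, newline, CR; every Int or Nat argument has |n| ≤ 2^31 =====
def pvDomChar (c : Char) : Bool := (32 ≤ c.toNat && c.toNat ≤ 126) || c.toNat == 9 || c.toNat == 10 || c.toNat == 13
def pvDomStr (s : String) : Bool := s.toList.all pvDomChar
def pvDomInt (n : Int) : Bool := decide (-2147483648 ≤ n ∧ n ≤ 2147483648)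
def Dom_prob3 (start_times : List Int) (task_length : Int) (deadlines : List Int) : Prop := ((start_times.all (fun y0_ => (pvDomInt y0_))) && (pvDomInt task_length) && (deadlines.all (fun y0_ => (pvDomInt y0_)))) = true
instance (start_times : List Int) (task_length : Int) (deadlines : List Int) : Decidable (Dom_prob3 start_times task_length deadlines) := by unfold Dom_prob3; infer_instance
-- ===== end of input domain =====

-- B replaces A's two heapq priority queues by plain sorted lists (pop = head,
-- push = re-sort) and its iterative binary search by a recursive one; same values.
-- A raises ValueError on length mismatch / negative task_length: excluded by Pre_.

-- ===== PORT A =====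
-- the `current_time` bump: if nothing is available, jump to the next release.
def bumpA (t0 : Int) (available rest : List (Int × Int)) : Int :=
  match available, rest with
  | [], p :: _ => if t0 < p.1 then p.1 else t0
  | _, _ => t0

def bumpB (f : Int) (waiting : List Int) (todo : List (Int × Int)) : Int :=
  match waiting, todo with
  | [], p :: _ => if f < p.1 then p.1 else f
  | _, _ => f

-- heapq.heappop on a list of ints: returns the minimum and the list without one
-- occurrence of it (exact: heappop returns the smallest element as a value).
def popMinInt : List Int → Option (Int × List Int)
  | [] => none
  | x :: xs =>
    match popMinInt xs with
    | none => some (x, [])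
    | some (m, rest) => if x ≤ m then some (x, xs) else some (m, x :: rest)

-- Python's lexicographic ≤ on int pairs (heap order for `available`).
def pairLe (p q : Int × Int) : Bool := decide (p.1 < q.1) || (decide (p.1 = q.1) && decide (p.2 ≤ q.2))

-- heapq.heappop on a list of int pairs (lexicographic minimum).
def popMinPair : List (Int × Int) → Option ((Int × Int) × List (Int × Int))
  | [] => none
  | x :: xs =>
    match popMinPair xs with
    | none => some (x, [])
    | some (m, rest) => if pairLe x m then some (x, xs) else some (m, x :: rest)

-- the inner `while idx < n and tasks[idx][0] <= current_time` loop: moves released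
-- tasks from the suffix `rest` into `available` as (latest_start, release_time).
def absorbA : List (Int × Int) → List (Int × Int) → Int → List (Int × Int) × List (Int × Int)
  | [], av, _ => ([], av)
  | (r, ls) :: rest, av, t =>
    if r ≤ t then absorbA rest ((ls, r) :: av) t else ((r, ls) :: rest, av)

-- the `while True` loop of _feasible_with_k; fuel only makes it total
-- (tasks.length + 1 steps always suffice, as the equivalence proof shows).
def loopA (L : Int) : Nat → List Int → List (Int × Int) → List (Int × Int) → Bool
  | 0, _, _, _ => false
  | fuel + 1, machines, available, rest =>
    if rest.isEmpty && available.isEmpty then true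
    else
      match popMinInt machines with
      | none => false
      | some (t0, ms) =>
        let t := bumpA t0 available rest
        let ra := absorbA rest available t
        if ra.2.isEmpty then loopA L fuel (t :: ms) ra.2 ra.1
        else
          match popMinPair ra.2 with
          | none => false
          | some ((ls, _), av'') =>
            if ls < t then false else loopA L fuel ((t + L) :: ms) av'' ra.1

-- the task-building loop with its early `return -1` (none = -1).
def buildA (L : Int) : List (Int × Int) → Option (List (Int × Int))
  | [] => some []
  | (s, d) :: rest =>
    if d - L < s then none
    else match buildA L rest with
      | none => none
      | some ts => some ((s, d - L) :: ts)

-- the `while left < right` binary search; `_feasible_with_k` inlined.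
def bsearchA (tasks : List (Int × Int)) (L : Int) (left right : Int) : Int :=
  if h : left < right then
    -- mid = (left + right) // 2, inlined at its two uses
    if loopA L (tasks.length + 1) (List.replicate (PySem.Int.floordiv (left + right) 2).toNat 0) [] tasks
    then bsearchA tasks L left (PySem.Int.floordiv (left + right) 2)
    else bsearchA tasks L (PySem.Int.floordiv (left + right) 2 + 1) right
  else left
termination_by (right - left).toNat
decreasing_by
  all_goals
    rw [PySem.Int.floordiv_eq_ediv_of_pos (by norm_num)]
    omega

def prob3 (start_times : List Int) (task_length : Int) (deadlines : List Int) : Int :=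
  if start_times.length ≠ deadlines.length then 0   -- ValueError (excluded by Pre_)
  else if start_times.length = 0 then 0
  else if task_length < 0 then 0                    -- ValueError (excluded by Pre_)
  else if task_length = 0 then
    (if (start_times.zip deadlines).any (fun p => decide (p.2 < p.1)) then -1 else 1)
  else
    match buildA task_length (start_times.zip deadlines) with
    | none => -1
    | some ts =>
      bsearchA (PySem.List.sorted ts (fun p => p.1)) task_length 1 (start_times.length : Int)

-- ===== PORT B =====
-- `sorted(waiting + [l for s, l in todo if s <= t])` of Source B.
def nextWaiting (waiting : List Int) (todo : List (Int × Int)) (t : Int) : List Int :=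
  PySem.List.sorted (waiting ++ (todo.filter (fun p => decide (p.1 ≤ t))).map Prod.snd) (fun x => x)

-- `[task for task in todo if task[0] > t]` of Source B.
def remTodo (todo : List (Int × Int)) (t : Int) : List (Int × Int) :=
  todo.filter (fun p => decide (t < p.1))

lemma nextWaiting_length (waiting : List Int) (todo : List (Int × Int)) (t : Int) :
    (nextWaiting waiting todo t).length = waiting.length + (todo.filter (fun p => decide (p.1 ≤ t))).length := by
  simp [nextWaiting, PySem.List.length_sorted]

lemma remTodo_length (todo : List (Int × Int)) (t : Int) :
    (remTodo todo t).length + (todo.filter (fun p => decide (p.1 ≤ t))).length = todo.length := by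
  have hsplit := List.length_eq_length_filter_add (l := todo) (f := fun p => decide (p.1 ≤ t))
  have hco : (todo.filter (fun a => !decide (a.1 ≤ t))).length = (remTodo todo t).length := by
    unfold remTodo
    congr 1
    apply List.filter_congr
    intro x _
    by_cases h : x.1 ≤ t
    · simp [h]
    · simp [h]
      omega
  omega

-- the `while todo or waiting` loop of can_schedule in Source B.
def loopB (L : Int) (free waiting : List Int) (todo : List (Int × Int)) : Bool :=
  if todo.isEmpty && waiting.isEmpty then true
  else
    match free with
    | [] => false  -- k ≥ 1 always, never reached
    | f :: fs =>
      let t := bumpB f waiting todo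
      let ws' := nextWaiting waiting todo t
      if ws'.isEmpty then false  -- Source B would index waiting[0] here; unreachable (see proof)
      else if t > ws'.headD 0 then false
      else loopB L (PySem.List.sorted ((t + L) :: fs) (fun x => x)) ws'.tail (remTodo todo t)
termination_by waiting.length + todo.length
decreasing_by
  rename_i hne _
  have hlen : ws'.length = waiting.length + (todo.filter (fun p => decide (p.1 ≤ t))).length := nextWaiting_length waiting todo t
  have hrem : (remTodo todo t).length + (todo.filter (fun p => decide (p.1 ≤ t))).length = todo.length := remTodo_length todo t
  have hpos : ws' ≠ [] := by
    intro hcon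
    rw [hcon] at hne
    simp at hne
  have htl : ws'.tail.length = ws'.length - 1 := by simp
  have hge : 1 ≤ ws'.length := by
    cases hc : ws' with
    | nil => exact absurd hc hpos
    | cons a as => simp
  show ws'.tail.length + (remTodo todo t).length < waiting.length + todo.length
  omega

-- the recursive binary search of Source B.
def searchB (tasks : List (Int × Int)) (L : Int) (lo hi : Int) : Int :=
  if h : lo ≥ hi then lo
  else
    -- mid = (lo + hi) // 2, inlined at its two uses
    if loopB L (List.replicate (PySem.Int.floordiv (lo + hi) 2).toNat 0) [] tasks
    then searchB tasks L lo (PySem.Int.floordiv (lo + hi) 2)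
    else searchB tasks L (PySem.Int.floordiv (lo + hi) 2 + 1) hi
termination_by (hi - lo).toNat
decreasing_by
  all_goals
    rw [PySem.Int.floordiv_eq_ediv_of_pos (by norm_num)]
    omega

def prob3_alt (start_times : List Int) (task_length : Int) (deadlines : List Int) : Int :=
  if start_times.length ≠ deadlines.length then 0   -- ValueError (excluded by Pre_)
  else if start_times.isEmpty then 0
  else if task_length < 0 then 0                    -- ValueError (excluded by Pre_)
  else if task_length = 0 then
    (if (start_times.zip deadlines).all (fun p => decide (p.1 ≤ p.2)) then 1 else -1)
  else
    let latest := deadlines.map (fun d => d - task_length)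
    if (start_times.zip latest).any (fun p => decide (p.2 < p.1)) then -1
    else
      let tasks := PySem.List.sorted (start_times.zip latest) (fun p => p.1)
      searchB tasks task_length 1 (tasks.length : Int)

-- ===== PRECONDITION & SPEC =====
-- Pre_ excludes exactly the ValueError inputs of A: mismatched lengths, and a
-- negative task_length with a nonempty task list (B raises there as well).
def Pre_prob3 (start_times : List Int) (task_length : Int) (deadlines : List Int) : Prop :=
  start_times.length = deadlines.length ∧ (start_times = [] ∨ 0 ≤ task_length)
instance (start_times : List Int) (task_length : Int) (deadlines : List Int) : Decidable (Pre_prob3 start_times task_length deadlines) := by unfold Pre_prob3; infer_instance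
def pvWitness_prob3 : List Int × Int × List Int := ([0, 2], 2, [4, 5])

def Spec_prob3 (start_times : List Int) (task_length : Int) (deadlines : List Int) (out : Int) : Prop := out = prob3_alt start_times task_length deadlines
instance (start_times : List Int) (task_length : Int) (deadlines : List Int) (out : Int) : Decidable (Spec_prob3 start_times task_length deadlines out) := by unfold Spec_prob3; infer_instance

-- ===== CLAIM (what is proved, stated in full; the proofs are below) =====
def Claim_equal_prob3 : Prop := ∀ (start_times : List Int) (task_length : Int) (deadlines : List Int), Dom_prob3 start_times task_length deadlines → Pre_prob3 start_times task_length deadlines → Spec_prob3 start_times task_length deadlines (prob3 start_times task_length deadlines)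

-- ===== LEMMAS AND PROOFS =====

lemma popMinInt_ne_none (x : Int) (xs : List Int) : popMinInt (x :: xs) ≠ none := by
  simp only [popMinInt]
  cases popMinInt xs with
  | none => simp
  | some p =>
    obtain ⟨m, rest⟩ := p
    dsimp only
    split <;> simp

lemma popMinPair_ne_none (x : Int × Int) (xs : List (Int × Int)) : popMinPair (x :: xs) ≠ none := by
  simp only [popMinPair]
  cases popMinPair xs with
  | none => simp
  | some p =>
    obtain ⟨m, rest⟩ := p
    dsimp only
    split <;> simp

lemma popMinInt_spec : ∀ (l : List Int) (m : Int) (r : List Int),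
    popMinInt l = some (m, r) → l.Perm (m :: r) ∧ ∀ y ∈ l, m ≤ y := by
  intro l
  induction l with
  | nil => intro m r h; simp [popMinInt] at h
  | cons x xs ih =>
    intro m r h
    simp only [popMinInt] at h
    cases hx : popMinInt xs with
    | none =>
      rw [hx] at h
      cases xs with
      | nil =>
        simp at h
        obtain ⟨rfl, rfl⟩ := h
        exact ⟨List.Perm.refl _, by simp⟩
      | cons z zs => exact absurd hx (popMinInt_ne_none z zs)
    | some p =>
      obtain ⟨m', rest⟩ := p
      rw [hx] at h
      obtain ⟨hperm, hmin⟩ := ih m' rest hx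
      by_cases hle : x ≤ m'
      · simp [hle] at h
        obtain ⟨rfl, rfl⟩ := h
        refine ⟨List.Perm.refl _, ?_⟩
        intro y hy
        rcases List.mem_cons.1 hy with rfl | hy
        · exact le_refl _
        · exact le_trans hle (hmin y hy)
      · simp [hle] at h
        obtain ⟨rfl, rfl⟩ := h
        refine ⟨(hperm.cons x).trans (List.Perm.swap m' x rest), ?_⟩
        intro y hy
        rcases List.mem_cons.1 hy with rfl | hy
        · omega
        · exact hmin y hy

lemma popMinPair_spec : ∀ (l : List (Int × Int)) (p : Int × Int) (r : List (Int × Int)),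
    popMinPair l = some (p, r) → l.Perm (p :: r) ∧ ∀ q ∈ l, p.1 ≤ q.1 := by
  intro l
  induction l with
  | nil => intro m r h; simp [popMinPair] at h
  | cons x xs ih =>
    intro m r h
    simp only [popMinPair] at h
    cases hx : popMinPair xs with
    | none =>
      rw [hx] at h
      cases xs with
      | nil =>
        simp at h
        obtain ⟨rfl, rfl⟩ := h
        exact ⟨List.Perm.refl _, by simp⟩
      | cons z zs => exact absurd hx (popMinPair_ne_none z zs)
    | some p =>
      obtain ⟨m', rest⟩ := p
      rw [hx] at h
      obtain ⟨hperm, hmin⟩ := ih m' rest hx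
      by_cases hle : pairLe x m' = true
      · simp [hle] at h
        obtain ⟨rfl, rfl⟩ := h
        have hxm : x.1 ≤ m'.1 := by
          simp only [pairLe, Bool.or_eq_true, Bool.and_eq_true, decide_eq_true_eq] at hle
          omega
        refine ⟨List.Perm.refl _, ?_⟩
        intro y hy
        rcases List.mem_cons.1 hy with rfl | hy
        · exact le_refl _
        · exact le_trans hxm (hmin y hy)
      · simp [hle] at h
        obtain ⟨rfl, rfl⟩ := h
        have hmx : m'.1 ≤ x.1 := by
          simp only [pairLe, Bool.or_eq_true, Bool.and_eq_true, decide_eq_true_eq] at hle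
          omega
        refine ⟨(hperm.cons x).trans (List.Perm.swap m' x rest), ?_⟩
        intro y hy
        rcases List.mem_cons.1 hy with rfl | hy
        · exact hmx
        · exact hmin y hy

-- popMinInt on a permutation of a sorted nonempty list returns its head, with a
-- remainder permuting its tail.
lemma popMinInt_of_perm_sorted (a : List Int) (f : Int) (fs : List Int)
    (hp : a.Perm (f :: fs)) (hs : (f :: fs).Pairwise (· ≤ ·)) :
    ∃ r, popMinInt a = some (f, r) ∧ r.Perm fs := by
  cases a with
  | nil => exact absurd hp.symm (by simp)
  | cons x xs =>
    cases hpm : popMinInt (x :: xs) with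
    | none => exact absurd hpm (popMinInt_ne_none x xs)
    | some p =>
      obtain ⟨m, r⟩ := p
      obtain ⟨hperm, hmin⟩ := popMinInt_spec _ _ _ hpm
      have hf_mem : f ∈ x :: xs := hp.mem_iff.2 List.mem_cons_self
      have hm_mem : m ∈ f :: fs := hp.mem_iff.1 (hperm.mem_iff.2 List.mem_cons_self)
      have hfle : ∀ y ∈ f :: fs, f ≤ y := by
        intro y hy
        rcases List.mem_cons.1 hy with rfl | hy
        · exact le_refl _
        · exact (List.pairwise_cons.1 hs).1 y hy
      have hmf : m = f := le_antisymm (hmin f hf_mem) (hfle m hm_mem)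
      subst hmf
      exact ⟨r, rfl, (hperm.symm.trans hp).cons_inv⟩

-- the pair analogue: the popped pair's first component is the least first
-- component, and the remainder's first components permute the tail.
lemma popMinPair_of_perm_sorted (av : List (Int × Int)) (w : Int) (ws : List Int)
    (hp : (av.map Prod.fst).Perm (w :: ws)) (hs : (w :: ws).Pairwise (· ≤ ·)) :
    ∃ p r, popMinPair av = some (p, r) ∧ p.1 = w ∧ (r.map Prod.fst).Perm ws := by
  cases av with
  | nil => exact absurd hp.symm (by simp)
  | cons x xs =>
    cases hpm : popMinPair (x :: xs) with
    | none => exact absurd hpm (popMinPair_ne_none x xs)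
    | some q =>
      obtain ⟨p, r⟩ := q
      obtain ⟨hperm, hmin⟩ := popMinPair_spec _ _ _ hpm
      have hp1_mem : p.1 ∈ w :: ws := by
        apply hp.mem_iff.1
        exact List.mem_map_of_mem (hperm.mem_iff.2 List.mem_cons_self)
      have hw_mem : w ∈ (x :: xs).map Prod.fst := hp.mem_iff.2 List.mem_cons_self
      obtain ⟨q, hq_mem, hq1⟩ := List.mem_map.1 hw_mem
      have hwle : ∀ y ∈ w :: ws, w ≤ y := by
        intro y hy
        rcases List.mem_cons.1 hy with rfl | hy
        · exact le_refl _
        · exact (List.pairwise_cons.1 hs).1 y hy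
      have hpw : p.1 = w := le_antisymm (hq1 ▸ hmin q hq_mem) (hwle p.1 hp1_mem)
      refine ⟨p, r, rfl, hpw, ?_⟩
      have h1 : ((x :: xs).map Prod.fst).Perm (p.1 :: r.map Prod.fst) := hperm.map Prod.fst
      have h2 : (p.1 :: r.map Prod.fst).Perm (w :: ws) := h1.symm.trans hp
      rw [hpw] at h2
      exact h2.cons_inv

lemma absorbA_spec : ∀ (rest av : List (Int × Int)) (t : Int),
    rest.Pairwise (fun a b => a.1 ≤ b.1) →
    (absorbA rest av t).1 = rest.filter (fun p => decide (t < p.1)) ∧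
    ((absorbA rest av t).2.map Prod.fst).Perm
      (((rest.filter (fun p => decide (p.1 ≤ t))).map Prod.snd) ++ av.map Prod.fst) := by
  intro rest
  induction rest with
  | nil => intro av t _; simp [absorbA]
  | cons q rest ih =>
    intro av t hpw
    obtain ⟨r, ls⟩ := q
    rw [List.pairwise_cons] at hpw
    obtain ⟨hhead, htail⟩ := hpw
    by_cases hr : r ≤ t
    · have h1 : ¬ (t < r) := by omega
      simp only [absorbA, if_pos hr]
      obtain ⟨ha, hb⟩ := ih ((ls, r) :: av) t htail
      refine ⟨by simp [ha, h1], ?_⟩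
      refine hb.trans ?_
      simp [hr]
    · have h1 : t < r := by omega
      simp only [absorbA, if_neg hr]
      have hall : rest.filter (fun p => decide (t < p.1)) = rest := by
        apply List.filter_eq_self.2
        intro a ha
        have := hhead a ha
        simp
        omega
      have hnone : rest.filter (fun p => decide (p.1 ≤ t)) = [] := by
        apply List.filter_eq_nil_iff.2
        intro a ha
        have := hhead a ha
        simp
        omega
      constructor
      · simp [h1, hall]
      · simp [hr, hnone]

lemma loop_eq (L : Int) : ∀ (fuel : Nat) (machines free : List Int)
    (available : List (Int × Int)) (waiting : List Int) (rest : List (Int × Int)),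
    machines ≠ [] →
    machines.Perm free → free.Pairwise (· ≤ ·) →
    (available.map Prod.fst).Perm waiting → waiting.Pairwise (· ≤ ·) →
    rest.Pairwise (fun a b => a.1 ≤ b.1) →
    rest.length + available.length < fuel →
    loopA L fuel machines available rest = loopB L free waiting rest := by
  intro fuel
  induction fuel with
  | zero => intro machines free available waiting rest _ _ _ _ _ _ hfuel; omega
  | succ fuel ih =>
    intro machines free available waiting rest hm hmf hfs hav hws hrest hfuel
    have hwlen : available.length = waiting.length := by
      have h1 := hav.length_eq
      simpa using h1
    have hAe : (available = []) ↔ (waiting = []) := by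
      constructor <;> intro hh <;> subst hh <;> simp_all
    rw [loopA, loopB.eq_def]
    have hguard : (rest.isEmpty && available.isEmpty) = (rest.isEmpty && waiting.isEmpty) := by
      cases available with
      | nil => simp [hAe.1 rfl]
      | cons a as =>
        cases waiting with
        | nil => exact absurd (hAe.2 rfl) (by simp)
        | cons b bs => rfl
    rw [hguard]
    by_cases hgd : (rest.isEmpty && waiting.isEmpty) = true
    · simp [hgd]
    · rw [if_neg hgd, if_neg hgd]
      cases hfree : free with
      | nil =>
        exfalso
        exact hm (List.Perm.eq_nil (hfree ▸ hmf))
      | cons f fs =>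
        obtain ⟨ms, hpop, hmsp⟩ := popMinInt_of_perm_sorted machines f fs (hfree ▸ hmf) (hfree ▸ hfs)
        rw [hpop]
        have hbump : bumpA f available rest = bumpB f waiting rest := by
          cases available with
          | nil => rw [hAe.1 rfl]; cases rest <;> rfl
          | cons a as =>
            cases waiting with
            | nil => exact absurd (hAe.2 rfl) (by simp)
            | cons b bs => rfl
        dsimp only
        rw [hbump]
        set t := bumpB f waiting rest with ht
        obtain ⟨ha1, ha2⟩ := absorbA_spec rest available t hrest
        set flt := rest.filter (fun p => decide (t < p.1)) with hflt
        set fle := (rest.filter (fun p => decide (p.1 ≤ t))).map Prod.snd with hfle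
        have hket : ((absorbA rest available t).2.map Prod.fst).Perm (waiting ++ fle) :=
          ha2.trans ((List.Perm.append_left fle hav).trans List.perm_append_comm)
        have hWperm : (nextWaiting waiting rest t).Perm (waiting ++ fle) :=
          PySem.List.sorted_perm _ _ _
        -- the available queue after absorbing is never empty here
        have hne2 : waiting ++ fle ≠ [] := by
          intro hnil
          obtain ⟨hw0, hf0⟩ := List.append_eq_nil_iff.1 hnil
          subst hw0
          have hrne : rest ≠ [] := by
            intro h0
            rw [h0] at hgd
            simp at hgd
          cases hrest0 : rest with
          | nil => exact hrne hrest0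
          | cons p rest2 =>
            have hpt : p.1 ≤ t := by
              rw [ht, hrest0]
              simp only [bumpB]
              split <;> omega
            have : fle ≠ [] := by
              rw [hfle, hrest0]
              simp [hpt]
            exact this hf0
        have hra2ne : (absorbA rest available t).2 ≠ [] := by
          intro hnil
          apply hne2
          have := hket
          rw [hnil] at this
          simpa using (this.symm.eq_nil)
        cases hW : nextWaiting waiting rest t with
        | nil =>
          exfalso
          apply hne2
          exact (hW ▸ hWperm).symm.eq_nil.symm ▸ rfl
        | cons w ws =>
          have hWs : (w :: ws).Pairwise (· ≤ ·) := by
            have := PySem.List.sorted_pairwise (waiting ++ fle) (fun x => x)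
            rw [show PySem.List.sorted (waiting ++ fle) (fun x => x) = nextWaiting waiting rest t from rfl, hW] at this
            simpa using this
          have hp : ((absorbA rest available t).2.map Prod.fst).Perm (w :: ws) :=
            hket.trans (hW ▸ hWperm.symm)
          obtain ⟨p, r, hpp, hp1, hrp⟩ := popMinPair_of_perm_sorted _ _ _ hp hWs
          rw [if_neg (by simpa [List.isEmpty_iff] using hra2ne), hpp]
          obtain ⟨ls, rel⟩ := p
          dsimp only at hp1 ⊢
          subst hp1
          simp only [List.isEmpty_cons, Bool.false_eq_true, if_false, List.headD_cons,
            List.tail_cons, gt_iff_lt]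
          by_cases hcmp : ls < t
          · simp [hcmp]
          · rw [if_neg hcmp, if_neg hcmp, ha1]
            have hrt : remTodo rest t = flt := rfl
            rw [← hrt]
            -- lengths for the fuel bound
            have hrlen : r.length = ws.length := by
              have h1 := hrp.length_eq
              simpa using h1
            have hWlen : (ls :: ws).length = waiting.length + (rest.filter (fun p => decide (p.1 ≤ t))).length := by
              rw [← hW]
              exact nextWaiting_length waiting rest t
            have hremlen := remTodo_length rest t
            apply ih
            · simp
            · exact ((hmsp.cons (t + L)).trans (PySem.List.sorted_perm ((t + L) :: fs) (fun x => x) false).symm)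
            · have h2 := PySem.List.sorted_pairwise ((t + L) :: fs) (fun x => x)
              simpa using h2
            · exact hrp
            · exact (List.pairwise_cons.1 hWs).2
            · exact List.Pairwise.filter _ hrest
            · simp only [List.length_cons] at hWlen
              omega

lemma feas_eq (tasks : List (Int × Int)) (L : Int) (k : Nat) (hk : k ≠ 0)
    (hts : tasks.Pairwise (fun a b => a.1 ≤ b.1)) :
    loopA L (tasks.length + 1) (List.replicate k 0) [] tasks
      = loopB L (List.replicate k 0) [] tasks := by
  apply loop_eq
  · simp [hk]
  · exact List.Perm.refl _
  · exact List.pairwise_replicate_of_refl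
  · simp
  · simp
  · exact hts
  · simp

lemma bs_eq (tasks : List (Int × Int)) (L : Int)
    (hts : tasks.Pairwise (fun a b => a.1 ≤ b.1)) :
    ∀ (n : Nat) (lo hi : Int), (hi - lo).toNat ≤ n → 1 ≤ lo →
    bsearchA tasks L lo hi = searchB tasks L lo hi := by
  intro n
  induction n with
  | zero =>
    intro lo hi hb hlo
    rw [bsearchA.eq_def, searchB.eq_def]
    rw [dif_neg (by omega), dif_pos (by omega)]
  | succ n ihn =>
    intro lo hi hb hlo
    rw [bsearchA.eq_def, searchB.eq_def]
    by_cases h : lo < hi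
    · rw [dif_pos h, dif_neg (by omega)]
      have hmid := PySem.Int.floordiv_eq_ediv_of_pos (a := lo + hi) (b := 2) (by norm_num)
      have h1 : (1:Int) ≤ PySem.Int.floordiv (lo + hi) 2 := by rw [hmid]; omega
      have h2 : lo ≤ PySem.Int.floordiv (lo + hi) 2 ∧ PySem.Int.floordiv (lo + hi) 2 < hi := by
        rw [hmid]; constructor <;> omega
      rw [feas_eq tasks L (PySem.Int.floordiv (lo + hi) 2).toNat (by omega) hts]
      by_cases hc : loopB L (List.replicate (PySem.Int.floordiv (lo + hi) 2).toNat 0) [] tasks = true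
      · rw [if_pos hc, if_pos hc]
        exact ihn lo _ (by omega) hlo
      · rw [if_neg hc, if_neg hc]
        exact ihn _ hi (by omega) (by omega)
    · rw [dif_neg h, dif_pos (by omega)]

lemma buildA_eq (L : Int) : ∀ (pairs : List (Int × Int)),
    buildA L pairs = if pairs.any (fun p => decide (p.2 - L < p.1)) then none
                     else some (pairs.map (fun p : Int × Int => (p.1, p.2 - L))) := by
  intro pairs
  induction pairs with
  | nil => simp [buildA]
  | cons q rest ih =>
    obtain ⟨s, d⟩ := q
    simp only [buildA, ih, List.any_cons, List.map_cons]
    by_cases h1 : d - L < s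
    · simp [h1]
    · by_cases h2 : rest.any (fun p => decide (p.2 - L < p.1)) <;> simp [h1, h2]

lemma all_eq_not_any (l : List (Int × Int)) :
    (l.all (fun p => decide (p.1 ≤ p.2))) = !(l.any (fun p => decide (p.2 < p.1))) := by
  induction l with
  | nil => rfl
  | cons a as ihh =>
    by_cases h : a.1 ≤ a.2
    · simp only [List.all_cons, List.any_cons, ihh]
      by_cases h2 : a.2 < a.1
      · omega
      · simp [h, h2]
    · simp only [List.all_cons, List.any_cons, ihh]
      have h2 : a.2 < a.1 := by omega
      simp [h, h2]

-- ===== VERDICT (by name: the statement is the Claim_ definition above) =====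
theorem prob3_spec : Claim_equal_prob3 := by
  intro st L dl _ hpre
  obtain ⟨hlen, hneg⟩ := hpre
  show prob3 st L dl = prob3_alt st L dl
  by_cases hnil : st = []
  · subst hnil
    have : dl = [] := by
      cases dl with
      | nil => rfl
      | cons a as => simp at hlen
    subst this
    simp [prob3, prob3_alt]
  · have hL0 : 0 ≤ L := hneg.resolve_left hnil
    have hbne : st.isEmpty = false := by
      cases st with
      | nil => exact absurd rfl hnil
      | cons a as => rfl
    rw [prob3, prob3_alt]
    have g1 : ¬ (st.length ≠ dl.length) := fun h => h hlen
    have g2 : ¬ (st.length = 0) := fun h => hnil (List.length_eq_zero_iff.1 h)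
    have g3 : ¬ (st.isEmpty = true) := by rw [hbne]; exact Bool.false_ne_true
    have g4 : ¬ (L < 0) := by omega
    rw [if_neg g1, if_neg g2, if_neg g4, if_neg g1, if_neg g3, if_neg g4]
    by_cases hLz : L = 0
    · rw [if_pos hLz, if_pos hLz]
      rw [all_eq_not_any]
      cases hany : (st.zip dl).any (fun p => decide (p.2 < p.1)) <;> simp
    · rw [if_neg hLz, if_neg hLz]
      have hzip : st.zip (dl.map (fun d => d - L)) = (st.zip dl).map (fun p : Int × Int => (p.1, p.2 - L)) := by
        rw [List.zip_map_right]
        rfl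
      simp only [hzip, List.any_map, buildA_eq]
      have hco : ((fun p => decide ((p : Int × Int).2 < p.1)) ∘ (fun p : Int × Int => (p.1, p.2 - L)))
          = (fun p => decide (p.2 - L < p.1)) := by
        funext p
        simp
      rw [hco]
      by_cases hbad : (st.zip dl).any (fun p => decide (p.2 - L < p.1)) = true
      · rw [if_pos hbad, if_pos hbad]
      · rw [if_neg hbad, if_neg hbad]
        have hts := PySem.List.sorted_pairwise ((st.zip dl).map (fun p : Int × Int => (p.1, p.2 - L))) (fun p => p.1)
        have hlen2 : (PySem.List.sorted ((st.zip dl).map (fun p : Int × Int => (p.1, p.2 - L))) (fun p => p.1)).length = st.length := by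
          rw [PySem.List.length_sorted, List.length_map, List.length_zip, hlen, Nat.min_self]
        rw [hlen2]
        exact bs_eq _ L hts (((st.length : Int)) - 1).toNat 1 _ (by omega) (by omega)
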